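-- pv_equiv track=rewrite | github.com/Wolfenswan/Unnamed-Roguelike | common/helpers.py | get_octants
-- ===== SOURCE A (Python) =====
-- def get_octants(x, y):
--     """
--     Returns the octants of the given position
--
--     :return: List of positions: (NW, W, SW, N, S, NE, E, SE)
--     :rtype: List of Tuples
--     """
--
--     octants = []
--     for dx in range(-1, 2):
--         for dy in range (-1,2):
--             octants.append((x+dx,y+dy))
--
--     octants.pop(4) # Remove the center position (where dx, dy = 0, 0)
--     octants.sort()
--     return octants
-- ===== SOURCE B (Python) =====
-- _OFFSETS = [(-1, -1), (-1, 0), (-1, 1), (0, -1), (0, 1), (1, -1), (1, 0), (1, 1)]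
--
-- def get_octants(x, y):
--     """Return the 8 neighbour positions of (x, y), in sorted tuple order."""
--     return [(x + dx, y + dy) for dx, dy in _OFFSETS]
-- ===== Notes on version B (the rewrite author's own statement) =====
-- stated objective: simpler
-- what changed: Replaces the nested range loops plus center pop plus sort with a single map over the eight neighbour offsets listed once, already in final sorted order, so the removal step and the sort disappear.
import Mathlib
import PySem

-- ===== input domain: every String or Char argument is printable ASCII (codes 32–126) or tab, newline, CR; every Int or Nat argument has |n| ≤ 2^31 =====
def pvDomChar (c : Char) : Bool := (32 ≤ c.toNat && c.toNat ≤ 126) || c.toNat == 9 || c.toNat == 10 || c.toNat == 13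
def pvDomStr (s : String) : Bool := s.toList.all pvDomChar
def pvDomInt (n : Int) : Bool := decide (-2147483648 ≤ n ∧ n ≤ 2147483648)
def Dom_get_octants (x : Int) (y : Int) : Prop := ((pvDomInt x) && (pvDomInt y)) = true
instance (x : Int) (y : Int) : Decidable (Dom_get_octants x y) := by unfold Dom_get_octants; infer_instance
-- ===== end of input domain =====

-- ===== PORT A =====
-- A: nested range(-1,2) loops appending (x+dx, y+dy); pop index 4 (the center); sort.
def get_octants (x : Int) (y : Int) : List (Int × Int) :=
  let octants : List (Int × Int) :=
    (PySem.List.pyRange (-1) 2 1).foldl (fun acc dx =>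
      (PySem.List.pyRange (-1) 2 1).foldl (fun acc2 dy => acc2 ++ [(x + dx, y + dy)]) acc) []
  match PySem.List.pop? octants 4 with
  | some (_, rest) => PySem.List.sorted2 rest (fun p => p.1) (fun p => p.2) false
  | none => []  -- unreachable: octants always has 9 elements

-- ===== PORT B =====
-- B: the eight neighbour offsets listed once, already in Python's tuple-sort order;
-- no center removal and no sort. Objective: simpler.
def pvOffsets : List (Int × Int) :=
  [(-1, -1), (-1, 0), (-1, 1), (0, -1), (0, 1), (1, -1), (1, 0), (1, 1)]

def get_octants_alt (x : Int) (y : Int) : List (Int × Int) :=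
  pvOffsets.map (fun d => (x + d.1, y + d.2))

-- ===== PRECONDITION & SPEC =====
def Spec_get_octants (x : Int) (y : Int) (out : List (Int × Int)) : Prop := out = get_octants_alt x y
instance (x : Int) (y : Int) (out : List (Int × Int)) : Decidable (Spec_get_octants x y out) := by unfold Spec_get_octants; infer_instance

-- ===== CLAIM (what is proved, stated in full; the proofs are below) =====
def Claim_equal_get_octants : Prop := ∀ (x : Int) (y : Int), Dom_get_octants x y → Spec_get_octants x y (get_octants x y)

-- ===== LEMMAS AND PROOFS =====

-- A builds the 3×3 block row by row, removes the center, and insertion-sorts a list that is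
-- already strictly increasing in Python's tuple order, so each insertBy appends at the end.
theorem get_octants_eq_alt (x y : Int) : get_octants x y = get_octants_alt x y := by
  have hr : PySem.List.pyRange (-1) 2 1 = [-1, 0, 1] := by decide
  simp only [get_octants, get_octants_alt, pvOffsets, hr, List.foldl, List.map]
  simp only [PySem.List.pop?, PySem.List.pyIdx?, PySem.List.sorted2]
  norm_num
  simp only [show Int.toNat 4 = 4 from rfl, List.eraseIdx, List.foldl]
  rw [PySem.List.insertBy_of_forall_not_before _ (x + -1, y + -1) ([] : List (Int × Int)) (by simp)]
  simp only [List.nil_append, List.cons_append]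
  rw [PySem.List.insertBy_of_forall_not_before _ (x + -1, y) [(x + -1, y + -1)] (by intro p hp; fin_cases hp <;> simp <;> omega)]
  simp only [List.nil_append, List.cons_append]
  rw [PySem.List.insertBy_of_forall_not_before _ (x + -1, y + 1) [(x + -1, y + -1), (x + -1, y)] (by intro p hp; fin_cases hp <;> simp <;> omega)]
  simp only [List.nil_append, List.cons_append]
  rw [PySem.List.insertBy_of_forall_not_before _ (x, y + -1) [(x + -1, y + -1), (x + -1, y), (x + -1, y + 1)] (by intro p hp; fin_cases hp <;> simp <;> omega)]
  simp only [List.nil_append, List.cons_append]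
  rw [PySem.List.insertBy_of_forall_not_before _ (x, y + 1) [(x + -1, y + -1), (x + -1, y), (x + -1, y + 1), (x, y + -1)] (by intro p hp; fin_cases hp <;> simp <;> omega)]
  simp only [List.nil_append, List.cons_append]
  rw [PySem.List.insertBy_of_forall_not_before _ (x + 1, y + -1) [(x + -1, y + -1), (x + -1, y), (x + -1, y + 1), (x, y + -1), (x, y + 1)] (by intro p hp; fin_cases hp <;> simp <;> omega)]
  simp only [List.nil_append, List.cons_append]
  rw [PySem.List.insertBy_of_forall_not_before _ (x + 1, y) [(x + -1, y + -1), (x + -1, y), (x + -1, y + 1), (x, y + -1), (x, y + 1), (x + 1, y + -1)] (by intro p hp; fin_cases hp <;> simp <;> omega)]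
  simp only [List.nil_append, List.cons_append]
  rw [PySem.List.insertBy_of_forall_not_before _ (x + 1, y + 1) [(x + -1, y + -1), (x + -1, y), (x + -1, y + 1), (x, y + -1), (x, y + 1), (x + 1, y + -1), (x + 1, y)] (by intro p hp; fin_cases hp <;> simp <;> omega)]
  simp

-- ===== VERDICT (by name: the statement is the Claim_ definition above) =====
theorem get_octants_spec : Claim_equal_get_octants := by
  intro x y _
  unfold Spec_get_octants
  exact get_octants_eq_alt x y
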